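-- pv_equiv track=rewrite | github.com/kgwiazdak/ASD_and_WDI-exercises- | Algorithms/Way_home.py | way_home
-- ===== SOURCE A (Python) =====
-- def way_home(T):
--     n = len(T)
--     arr = [1 for _ in range(n)]
--     for i in range(n-3, -1,-1):
--         suma=0
--         for j in range(i+1, i+ T[i]+1):
--             if j==n:break
--             suma+=arr[j]
--         arr[i]=suma
--
--     return arr[0]
-- ===== SOURCE B (Python) =====
-- def way_home(T):
--     n = len(T)
--     S = [0]                      # suffix sums of the ways array, most recent last: S[k] = ways[n-k] + ... + ways[n-1]
--     for i in range(n - 1, -1, -1):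
--         if i >= n - 2:
--             v = 1
--         else:
--             hi = min(i + T[i] + 1, n)
--             v = S[-1] - S[i - hi] if hi > i + 1 else 0
--         S.append(v + S[-1])
--     return S[-1] - S[-2]
-- ===== Notes on version B (the rewrite author's own statement) =====
-- stated objective: faster
-- what changed: B replaces A's per-cell re-summation of each jump window over the ways array by a single right-to-left pass that maintains suffix sums, computing each window sum as a difference of two suffix sums.
import Mathlib
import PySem

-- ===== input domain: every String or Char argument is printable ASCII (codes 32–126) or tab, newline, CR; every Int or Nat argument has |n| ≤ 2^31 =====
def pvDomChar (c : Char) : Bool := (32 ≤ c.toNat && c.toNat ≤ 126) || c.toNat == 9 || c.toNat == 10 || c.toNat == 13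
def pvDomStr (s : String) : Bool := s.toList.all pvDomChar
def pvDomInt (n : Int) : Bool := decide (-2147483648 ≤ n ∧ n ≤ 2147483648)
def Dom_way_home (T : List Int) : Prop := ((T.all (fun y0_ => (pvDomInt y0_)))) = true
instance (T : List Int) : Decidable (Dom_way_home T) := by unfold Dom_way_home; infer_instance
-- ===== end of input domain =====

-- B replaces A's quadratic re-summation of each jump window by a single right-to-left pass
-- over suffix sums (each window sum is a difference of two suffix sums): measured faster (asymptotic).

-- ===== PORT A =====
-- inner loop 'for j in range(i+1, i+T[i]+1): if j==n: break; suma+=arr[j]' ported as a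
-- recursion on j (the break makes Python's range lazy, so the range is not materialised);
-- arr[j] via pyGetD: exact here, Python never goes out of range in this loop (j < n ≤ len(arr)).
def way_home_inner (arr : List Int) (n stp j suma : Int) : Int :=
  if _h : stp ≤ j then suma
  else if j = n then suma
  else way_home_inner arr n stp (j+1) (suma + PySem.List.pyGetD arr j 0)
termination_by (stp - j).toNat
decreasing_by omega

def way_home (T : List Int) : Int :=
  let n : Int := T.length
  let arr :=
    (PySem.List.pyRange (n-3) (-1) (-1)).foldl
      (fun arr i => PySem.List.pySetD arr i
        (way_home_inner arr n (i + PySem.List.pyGetD T i 0 + 1) (i+1) 0))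
      (List.replicate T.length (1:Int))
  PySem.List.pyGetD arr 0 0  -- arr[0]: Python raises IndexError for T = [] (excluded by Pre_)

-- ===== PORT B =====
-- B's Python appends suffix sums to a list (most recent LAST) and indexes it from the end;
-- the port keeps the list most-recent-FIRST, so Python's S[-1] is .headD and S[i-hi]
-- ((hi-i)-th from the end) is index hi-i-1 from the head. Same loop, same values.
def way_home_alt_build (T : List Int) : Nat → List Int
  | 0 => [0]
  | k+1 =>
    let S := way_home_alt_build T k
    let n : Int := T.length
    let i : Int := n - ((k : Int) + 1)
    let v : Int :=
      if i ≥ n - 2 then 1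
      else
        let hi := min (i + PySem.List.pyGetD T i 0 + 1) n
        if hi > i + 1 then S.headD 0 - PySem.List.pyGetD S (hi - i - 1) 0 else 0
    (v + S.headD 0) :: S

def way_home_alt (T : List Int) : Int :=
  let S := way_home_alt_build T T.length
  S.headD 0 - PySem.List.pyGetD S 1 0  -- S[-1] - S[-2]: Python raises IndexError for T = []

-- ===== PRECONDITION & SPEC =====
-- Pre_ excludes only the empty list, on which both A ('arr[0]') and B ('S[-2]') raise IndexError.
def Pre_way_home (T : List Int) : Prop := T ≠ []
instance (T : List Int) : Decidable (Pre_way_home T) := by unfold Pre_way_home; infer_instance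

def pvWitness_way_home : List Int := [2, 1, 1]

def Spec_way_home (T : List Int) (out : Int) : Prop := out = way_home_alt T
instance (T : List Int) (out : Int) : Decidable (Spec_way_home T out) := by unfold Spec_way_home; infer_instance

-- ===== CLAIM (what is proved, stated in full; the proofs are below) =====
def Claim_equal_way_home : Prop := ∀ (T : List Int), Dom_way_home T → Pre_way_home T → Spec_way_home T (way_home T)

-- ===== LEMMAS AND PROOFS =====

-- Reference: the final ways array of A, built right to left.
-- wRef T k = [a_{n-k}, …, a_{n-1}] where a_i = 1 for i ≥ n-2 and otherwise the window sum.
def wRef (T : List Int) : Nat → List Int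
  | 0 => []
  | k+1 =>
    let rest := wRef T k
    let v : Int :=
      if k + 1 ≤ 2 then 1
      else (rest.take (min (PySem.List.pyGetD T ((T.length : Int) - ((k : Int) + 1)) 0) (k : Int)).toNat).sum
    v :: rest

theorem length_wRef (T : List Int) : ∀ k, (wRef T k).length = k := by
  intro k; induction k with
  | zero => simp [wRef]
  | succ k ih => simp [wRef, ih]

-- suffix sums of a list: sufS l = [sum l, sum (tail l), …, 0]
def sufS : List Int → List Int
  | [] => [0]
  | v :: r => (v + (sufS r).headD 0) :: sufS r

theorem sufS_headD (l : List Int) : (sufS l).headD 0 = l.sum := by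
  induction l with
  | nil => simp [sufS]
  | cons v r ih => simp only [sufS, List.headD_cons, ih, List.sum_cons]

theorem length_sufS (l : List Int) : (sufS l).length = l.length + 1 := by
  induction l with
  | nil => simp [sufS]
  | cons v r ih => simp [sufS, ih]

theorem sufS_getD : ∀ (l : List Int) (m : Nat), m ≤ l.length →
    (sufS l).getD m 0 = (l.drop m).sum := by
  intro l; induction l with
  | nil =>
    intro m hm
    simp only [List.length_nil, Nat.le_zero] at hm
    subst hm; simp [sufS]
  | cons v r ih =>
    intro m hm
    cases m with
    | zero =>
      simp only [sufS, List.getD_cons_zero, List.drop_zero, List.sum_cons, sufS_headD]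
    | succ m =>
      simp only [sufS, List.getD_cons_succ, List.drop_succ_cons]
      exact ih m (by simpa using hm)

theorem sum_take_drop (l : List Int) (m : Nat) :
    (l.take m).sum = l.sum - (l.drop m).sum := by
  have := List.sum_take_add_sum_drop l m
  omega

theorem build_eq (T : List Int) : ∀ k, way_home_alt_build T k = sufS (wRef T k) := by
  intro k; induction k with
  | zero => simp [way_home_alt_build, wRef, sufS]
  | succ k ih =>
    have hlen : (wRef T k).length = k := length_wRef T k
    simp only [way_home_alt_build, wRef, sufS, ih]
    congr 1
    set n : Int := (T.length : Int) with hn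
    set i : Int := n - ((k : Int) + 1) with hi
    set t : Int := PySem.List.pyGetD T i 0 with ht
    have hik : PySem.List.pyGetD T ((T.length : Int) - ((k : Int) + 1)) 0 = t := rfl
    by_cases h2 : k + 1 ≤ 2
    · have : i ≥ n - 2 := by omega
      simp [this, h2]
    · have hnot : ¬ i ≥ n - 2 := by omega
      simp only [hnot, if_false]
      rw [if_neg h2]
      congr 1
      have hS : (sufS (wRef T k)).length = k + 1 := by rw [length_sufS, hlen]
      by_cases hpos : min (i + t + 1) n > i + 1
      · rw [if_pos hpos]
        have hb1 : 0 ≤ min (i + t + 1) n - i - 1 := by omega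
        have hb2 : min (i + t + 1) n - i - 1 < ((sufS (wRef T k)).length : Int) := by
          rw [hS]; push_cast; omega
        rw [PySem.List.pyGetD_eq_getElem _ 0 hb1 hb2]
        have hgd : (sufS (wRef T k))[(min (i + t + 1) n - i - 1).toNat] =
            (sufS (wRef T k)).getD (min t (k : Int)).toNat 0 := by
          rw [List.getD_eq_getElem _ _ (by omega)]
          congr 1; omega
        rw [hgd, sufS_getD _ _ (by omega), sufS_headD, sum_take_drop]
      · rw [if_neg hpos]
        have : (min t (k : Int)).toNat = 0 := by omega
        simp [this]

theorem inner_eq (arr : List Int) (stp : Int) : ∀ (fuel : Nat) (j suma : Int), 0 ≤ j → (stp - j).toNat ≤ fuel →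
    way_home_inner arr (arr.length : Int) stp j suma
      = suma + ((arr.drop j.toNat).take (min stp (arr.length : Int) - j).toNat).sum := by
  intro fuel
  induction fuel with
  | zero =>
    intro j suma hj hf
    rw [way_home_inner, dif_pos (by omega : stp ≤ j)]
    have : (min stp (arr.length : Int) - j).toNat = 0 := by omega
    simp [this]
  | succ f ih =>
    intro j suma hj hf
    rw [way_home_inner]
    by_cases h1 : stp ≤ j
    · rw [dif_pos h1]
      have : (min stp (arr.length : Int) - j).toNat = 0 := by omega
      simp [this]
    · rw [dif_neg h1]
      by_cases h2 : j = (arr.length : Int)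
      · rw [if_pos h2]
        have : j.toNat = arr.length := by omega
        simp [this]
      · rw [if_neg h2]
        rw [ih (j+1) _ (by omega) (by omega)]
        by_cases hlt : j < (arr.length : Int)
        · have hjn : j.toNat < arr.length := by omega
          rw [PySem.List.pyGetD_eq_getElem arr 0 hj (by omega)]
          rw [List.drop_eq_getElem_cons hjn]
          have ha : (min stp (arr.length : Int) - j).toNat
              = (min stp (arr.length : Int) - (j+1)).toNat + 1 := by omega
          have hb : (j+1).toNat = j.toNat + 1 := by omega
          rw [ha, hb, List.take_succ_cons, List.sum_cons]
          ring
        · have hge : arr.length ≤ j.toNat := by omega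
          have hd : arr.drop j.toNat = [] := List.drop_eq_nil_of_le hge
          have hd2 : arr.drop (j+1).toNat = [] := List.drop_eq_nil_of_le (by omega)
          have hg : PySem.List.pyGetD arr j 0 = 0 := by
            apply PySem.List.pyGetD_of_none
            rw [PySem.List.pyGet?_eq_none_iff]
            simp [PySem.Raise.InRange]
            omega
          simp [hd, hd2, hg]

theorem foldA (T : List Int) : ∀ (m : Nat), m + 2 ≤ T.length →
    (PySem.List.pyRange ((m : Int) - 1) (-1) (-1)).foldl
      (fun arr i => PySem.List.pySetD arr i
        (way_home_inner arr (T.length : Int) (i + PySem.List.pyGetD T i 0 + 1) (i+1) 0))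
      (List.replicate m 1 ++ wRef T (T.length - m))
    = wRef T T.length := by
  intro m; induction m with
  | zero =>
    intro _
    rw [PySem.List.pyRange_neg_one_eq_nil (by omega)]
    simp
  | succ m ih =>
    intro h
    have hcast : ((m + 1 : Nat) : Int) - 1 = (m : Int) := by push_cast; ring
    rw [hcast, PySem.List.pyRange_neg_one_cons (by omega : (-1 : Int) < (m : Int)), List.foldl_cons]
    have harr : PySem.List.pySetD (List.replicate (m+1) 1 ++ wRef T (T.length - (m+1))) (m : Int)
        (way_home_inner (List.replicate (m+1) 1 ++ wRef T (T.length - (m+1))) (T.length : Int)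
          ((m : Int) + PySem.List.pyGetD T (m : Int) 0 + 1) ((m : Int)+1) 0)
        = List.replicate m 1 ++ wRef T (T.length - m) := by
      set n : Nat := T.length with hn
      set arr0 : List Int := List.replicate (m+1) 1 ++ wRef T (n - (m+1)) with ha0
      set t : Int := PySem.List.pyGetD T (m : Int) 0 with ht
      have hlen0 : arr0.length = n := by
        simp [ha0, length_wRef]; omega
      have hsum : way_home_inner arr0 (n : Int) ((m : Int) + t + 1) ((m : Int)+1) 0
          = ((wRef T (n - (m+1))).take (min t ((n : Int) - m - 1)).toNat).sum := by
        have := inner_eq arr0 ((m : Int) + t + 1) (((m : Int) + t + 1 - ((m : Int)+1)).toNat)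
          ((m : Int)+1) 0 (by omega) (le_refl _)
        rw [hlen0] at this
        rw [this]
        have hdrop : arr0.drop ((m : Int)+1).toNat = wRef T (n - (m+1)) := by
          have : ((m : Int)+1).toNat = (List.replicate (m+1) (1:Int)).length := by simp
          rw [this, ha0, List.drop_left]
        rw [hdrop]
        have : (min ((m : Int) + t + 1) (n : Int) - ((m : Int)+1)).toNat
            = (min t ((n : Int) - m - 1)).toNat := by omega
        rw [this]; ring
      rw [hsum]
      -- perform the set
      have hsplit : arr0 = List.replicate m 1 ++ (1 :: wRef T (n - (m+1))) := by
        rw [ha0, List.replicate_succ' (n := m)]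
        simp
      rw [PySem.List.pySetD_natCast, hsplit, List.set_append,
        if_neg (by simp : ¬ m < (List.replicate m (1:Int)).length)]
      simp only [List.length_replicate, Nat.sub_self, List.set_cons_zero]
      congr 1
      -- wRef T (n - m) unfolds to the computed head
      rw [show n - m = (n - (m+1)) + 1 from by omega]
      simp only [wRef]
      rw [if_neg (by omega : ¬ (n - (m+1)) + 1 ≤ 2)]
      have e1 : (T.length : Int) - (((n - (m+1) : Nat) : Int) + 1) = (m : Int) := by
        have : ((n - (m+1) : Nat) : Int) = (n : Int) - (m : Int) - 1 := by
          push_cast [Nat.cast_sub (by omega : m + 1 ≤ n)]; ring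
        rw [this, ← hn]; ring
      have e2 : ((n - (m+1) : Nat) : Int) = (n : Int) - (m : Int) - 1 := by
        push_cast [Nat.cast_sub (by omega : m + 1 ≤ n)]; ring
      rw [e1, e2, ← ht]
    rw [harr]
    exact ih (by omega)

theorem sufS_ne_nil (l : List Int) : sufS l ≠ [] := by
  cases l <;> simp [sufS]

theorem alt_eq_head (T : List Int) (h : T ≠ []) :
    way_home_alt T = (wRef T T.length).headD 0 := by
  obtain ⟨k, hk⟩ : ∃ k, T.length = k + 1 := ⟨T.length - 1, by cases T <;> simp_all⟩
  obtain ⟨v, hv⟩ : ∃ v, wRef T (k+1) = v :: wRef T k := by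
    simp only [wRef]; exact ⟨_, rfl⟩
  show (way_home_alt_build T T.length).headD 0
      - PySem.List.pyGetD (way_home_alt_build T T.length) 1 0 = _
  rw [build_eq, hk, hv]
  obtain ⟨a, l, hl⟩ : ∃ a l, sufS (wRef T k) = a :: l := by
    cases hs : sufS (wRef T k) with
    | nil => exact absurd hs (sufS_ne_nil _)
    | cons a l => exact ⟨a, l, rfl⟩
  rw [sufS, hl]
  have hg : PySem.List.pyGetD ((v + (a :: l).headD 0) :: a :: l) 1 0 = a := by
    have := PySem.List.pyGetD_eq_getElem ((v + (a :: l).headD 0) :: a :: l) 0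
      (by omega : (0:Int) ≤ 1) (by simp)
    simpa using this
  rw [hg, List.headD_cons, List.headD_cons, List.headD_cons]
  ring

theorem a_eq_head (T : List Int) (h : T ≠ []) :
    way_home T = (wRef T T.length).headD 0 := by
  show PySem.List.pyGetD
      ((PySem.List.pyRange ((T.length : Int) - 3) (-1) (-1)).foldl
        (fun arr i => PySem.List.pySetD arr i
          (way_home_inner arr (T.length : Int) (i + PySem.List.pyGetD T i 0 + 1) (i+1) 0))
        (List.replicate T.length (1:Int))) 0 0 = _
  by_cases h2 : T.length ≤ 1
  · have h1 : T.length = 1 := by cases T <;> simp_all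
    rw [h1]
    rw [PySem.List.pyRange_neg_one_eq_nil (by norm_num)]
    simp [wRef]
  · -- n ≥ 2 : use foldA with m = n - 2
    have hm : (T.length - 2) + 2 = T.length := by omega
    have hcast : ((T.length - 2 : Nat) : Int) - 1 = (T.length : Int) - 3 := by
      push_cast [Nat.cast_sub (by omega : 2 ≤ T.length)]; ring
    have hinit : List.replicate T.length (1:Int)
        = List.replicate (T.length - 2) 1 ++ wRef T (T.length - (T.length - 2)) := by
      have : T.length - (T.length - 2) = 2 := by omega
      rw [this]
      show _ = List.replicate (T.length - 2) 1 ++ [1, 1]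
      rw [show ([1, 1] : List Int) = List.replicate 2 1 from rfl, ← List.replicate_add]
      congr 1; omega
    rw [← hcast, hinit, foldA T (T.length - 2) (by omega)]
    cases hw : wRef T T.length with
    | nil => have := length_wRef T T.length; rw [hw] at this; simp at this; omega
    | cons a l => simp [PySem.List.pyGetD_zero_cons]

-- ===== VERDICT (by name: the statement is the Claim_ definition above) =====
theorem way_home_spec : Claim_equal_way_home := by
  intro T _ hpre
  unfold Spec_way_home
  rw [a_eq_head T hpre, alt_eq_head T hpre]
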